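-- pv_equiv track=rewrite | github.com/guilhermebaos/Aulas-Uni | Programação I/Exames-ano-passado/Exame-recurso/002-Contagem-de-nomes.py | count_names
-- ===== SOURCE A (Python) =====
-- import string
--
-- def count_names(text):
--     words = text.split()
--
--     names = set()
--     for w in words:
--         if len(w) >= 2 and w[0] in string.ascii_uppercase:
--             is_name = True
--             for letter in w[1:]:
--                 # Check that every letter is lowercase
--                 is_name &= letter in string.ascii_lowercase
--
--             if is_name:
--                 names.add(w)
--     return len(names)
-- ===== SOURCE B (Python) =====
-- def count_names(text):
--     # Sort the qualifying words, then count group boundaries (sort-based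
--     # distinct count instead of a hash set).
--     good = sorted(w for w in text.split()
--                   if len(w) >= 2 and 'A' <= w[0] <= 'Z'
--                   and all('a' <= c <= 'z' for c in w[1:]))
--     count = 0
--     prev = None
--     for w in good:
--         if w != prev:
--             count += 1
--         prev = w
--     return count
-- ===== Notes on version B (the rewrite author's own statement) =====
-- stated objective: alternative
-- what changed: Replaces A's hash-set accumulation (membership-test filter with an inner boolean-accumulation loop, then set size) by sort-then-scan distinct counting: filter words with comparison chains and all(), sort them, and count adjacent group boundaries with a prev accumulator.
import Mathlib
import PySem

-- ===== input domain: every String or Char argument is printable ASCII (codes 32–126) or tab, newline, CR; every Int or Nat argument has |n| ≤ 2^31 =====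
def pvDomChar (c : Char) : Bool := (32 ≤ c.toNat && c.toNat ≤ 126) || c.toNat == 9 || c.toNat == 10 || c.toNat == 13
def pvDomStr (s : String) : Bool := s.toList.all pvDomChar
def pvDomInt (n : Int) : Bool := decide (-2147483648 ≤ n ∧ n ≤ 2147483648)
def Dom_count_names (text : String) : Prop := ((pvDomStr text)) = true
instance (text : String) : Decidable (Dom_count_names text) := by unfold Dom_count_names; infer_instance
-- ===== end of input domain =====

-- B counts the distinct qualifying words by sorting them and counting adjacent group
-- boundaries, instead of A's hash-set accumulation (alternative algorithm; same result).

-- ===== PORT A =====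
-- string.ascii_uppercase / string.ascii_lowercase, as their character lists
def pvAsciiUpper : List Char :=
  ['A','B','C','D','E','F','G','H','I','J','K','L','M','N','O','P','Q','R','S','T','U','V','W','X','Y','Z']
def pvAsciiLower : List Char :=
  ['a','b','c','d','e','f','g','h','i','j','k','l','m','n','o','p','q','r','s','t','u','v','w','x','y','z']

def count_names (text : String) : Int :=
  let words := PySem.Str.split₀ text
  let names := words.foldl (fun names w =>
    -- w[0]: the guard 2 ≤ len w makes w nonempty, so headD is exact there
    if decide (2 ≤ PySem.Str.len w) && pvAsciiUpper.contains (w.toList.headD ' ') then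
      -- for letter in w[1:]: is_name &= letter in ascii_lowercase   (w[1:] = drop 1, exact)
      let is_name := (w.toList.drop 1).foldl (fun b letter => b && pvAsciiLower.contains letter) true
      if is_name then PySem.Set.add names w else names
    else names) PySem.Set.empty
  PySem.Set.len names

-- ===== PORT B =====
-- len(w) >= 2 and 'A' <= w[0] <= 'Z' and all('a' <= c <= 'z' for c in w[1:])
-- (char comparisons are code-point comparisons, exact on ASCII)
def pvGood (w : String) : Bool :=
  decide (2 ≤ PySem.Str.len w) &&
  (decide ('A' ≤ w.toList.headD ' ') && decide (w.toList.headD ' ' ≤ 'Z')) &&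
  (w.toList.drop 1).all (fun c => decide ('a' ≤ c) && decide (c ≤ 'z'))

def count_names_alt (text : String) : Int :=
  let good := PySem.List.sorted ((PySem.Str.split₀ text).filter pvGood) (fun w => w) false
  -- count = 0; prev = None; for w in good: if w != prev: count += 1; prev = w
  (good.foldl (fun (st : Int × Option String) w =>
      (if some w ≠ st.2 then st.1 + 1 else st.1, some w)) ((0 : Int), (none : Option String))).1

-- ===== PRECONDITION & SPEC =====
def Spec_count_names (text : String) (out : Int) : Prop := out = count_names_alt text
instance (text : String) (out : Int) : Decidable (Spec_count_names text out) := by unfold Spec_count_names; infer_instance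

-- ===== CLAIM (what is proved, stated in full; the proofs are below) =====
def Claim_equal_count_names : Prop := ∀ (text : String), Dom_count_names text → Spec_count_names text (count_names text)

-- ===== LEMMAS AND PROOFS =====

lemma pv_mem_upper (c : Char) :
    pvAsciiUpper.contains c = (decide ('A' ≤ c) && decide (c ≤ 'Z')) := by
  rw [Bool.eq_iff_iff]
  simp [pvAsciiUpper, Char.ext_iff, UInt32.ext_iff, Char.le_def, UInt32.le_iff_toNat_le]
  omega

lemma pv_mem_lower (c : Char) :
    pvAsciiLower.contains c = (decide ('a' ≤ c) && decide (c ≤ 'z')) := by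
  rw [Bool.eq_iff_iff]
  simp [pvAsciiLower, Char.ext_iff, UInt32.ext_iff, Char.le_def, UInt32.le_iff_toNat_le]
  omega

lemma pv_foldl_and (q : Char → Bool) (l : List Char) (b : Bool) :
    l.foldl (fun b c => b && q c) b = (b && l.all q) := by
  induction l generalizing b with
  | nil => simp
  | cons c l ih => simp [List.foldl, ih, Bool.and_assoc]

-- A's per-word condition equals B's per-word test
lemma pv_cond_eq (w : String) :
    ((decide (2 ≤ PySem.Str.len w) && pvAsciiUpper.contains (w.toList.headD ' ')) &&
      (w.toList.drop 1).foldl (fun b letter => b && pvAsciiLower.contains letter) true) =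
    pvGood w := by
  unfold pvGood
  rw [pv_foldl_and, pv_mem_upper]
  have hl : pvAsciiLower.contains
       = (fun c => decide ('a' ≤ c) && decide (c ≤ 'z')) := by
    funext c; exact pv_mem_lower c
  rw [hl]
  simp [Bool.and_assoc]

-- folding a conditional add equals folding add over the filtered list
lemma pv_fold_filter (p : String → Bool) (ws : List String) (s : PySem.Set String) :
    ws.foldl (fun s w => if p w then PySem.Set.add s w else s) s =
    (ws.filter p).foldl PySem.Set.add s := by
  induction ws generalizing s with
  | nil => rfl
  | cons w ws ih =>
    by_cases h : p w <;> simp [List.foldl, List.filter, h, ih]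

-- the boundary-count recursion behind B's loop
def pvG (prev : Option String) : List String → Int
  | [] => 0
  | w :: ws => (if some w ≠ prev then 1 else 0) + pvG (some w) ws

lemma pv_foldl_g (l : List String) (prev : Option String) (acc : Int) :
    (l.foldl (fun (st : Int × Option String) w =>
        (if some w ≠ st.2 then st.1 + 1 else st.1, some w)) (acc, prev)).1
    = acc + pvG prev l := by
  induction l generalizing prev acc with
  | nil => simp [pvG]
  | cons w ws ih =>
    simp only [List.foldl]
    split_ifs with h <;> rw [ih] <;> simp [pvG, h] <;> ring

lemma pv_len_ofList_eq_card (xs : List String) :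
    ((PySem.Set.ofList xs).length : Int) = (xs.toFinset.card : Int) := by
  have hnd := PySem.Set.nodup_ofList (xs := xs)
  have hfs : (PySem.Set.ofList xs).toFinset = xs.toFinset := by
    ext a; simp [List.mem_toFinset, PySem.Set.mem_ofList]
  rw [← List.toFinset_card_of_nodup hnd, hfs]

-- on a ≤-sorted tail, counting changes after w visits each distinct element once
lemma pv_g_sorted_cons (w : String) (l : List String)
    (h : (w :: l).Pairwise (· ≤ ·)) :
    pvG (some w) l + 1 = ((w :: l).toFinset.card : Int) := by
  induction l generalizing w with
  | nil => simp [pvG]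
  | cons v vs ih =>
    have hvl : (v :: vs).Pairwise (· ≤ ·) := h.of_cons
    have hwv : w ≤ v := (List.pairwise_cons.mp h).1 v (by simp)
    have hih := ih v hvl
    by_cases hvw : v = w
    · subst hvw
      have hstep : pvG (some v) (v :: vs) = pvG (some v) vs := by simp [pvG]
      rw [hstep, hih]
      simp [List.toFinset_cons]
    · have hwnot : w ∉ v :: vs := by
        intro hmem
        rcases List.mem_cons.mp hmem with h1 | h2
        · exact hvw h1.symm
        · have hvw' : v ≤ w := (List.pairwise_cons.mp hvl).1 w h2
          exact hvw (le_antisymm hvw' hwv)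
      have hcard : ((w :: v :: vs).toFinset.card) = (v :: vs).toFinset.card + 1 := by
        rw [List.toFinset_cons (a := w),
          Finset.card_insert_of_notMem (by simpa using hwnot)]
      have hstep : pvG (some w) (v :: vs) = 1 + pvG (some v) vs := by
        simp [pvG, hvw]
      rw [hstep, hcard]
      push_cast
      omega

lemma pv_g_sorted (l : List String) (h : l.Pairwise (· ≤ ·)) :
    pvG none l = (l.toFinset.card : Int) := by
  cases l with
  | nil => simp [pvG]
  | cons w ws =>
    have hstep : pvG none (w :: ws) = 1 + pvG (some w) ws := by simp [pvG]
    have := pv_g_sorted_cons w ws h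
    omega

-- ===== VERDICT (by name: the statement is the Claim_ definition above) =====
theorem count_names_spec : Claim_equal_count_names := by
  intro text _
  unfold Spec_count_names count_names count_names_alt
  have hbody : ∀ (s : PySem.Set String) (w : String),
      (if decide (2 ≤ PySem.Str.len w) && pvAsciiUpper.contains (w.toList.headD ' ') then
        let is_name := (w.toList.drop 1).foldl (fun b letter => b && pvAsciiLower.contains letter) true
        if is_name then PySem.Set.add s w else s
      else s) =
      (if pvGood w then PySem.Set.add s w else s) := by
    intro s w
    rw [← pv_cond_eq w]
    by_cases h1 : (decide (2 ≤ PySem.Str.len w) && pvAsciiUpper.contains (w.toList.headD ' ')) = true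
    · simp only [h1, if_true, Bool.true_and]
    · simp only [h1]
      rw [Bool.not_eq_true] at h1
      simp
  simp only [hbody]
  rw [pv_fold_filter,
    show (PySem.Set.empty : PySem.Set String) = ([] : List String) from rfl,
    ← PySem.Set.ofList_eq_foldl]
  set f := (PySem.Str.split₀ text).filter pvGood with hf
  rw [pv_foldl_g, zero_add,
    pv_g_sorted _ (PySem.List.sorted_pairwise (xs := f) (key := fun w => w)),
    PySem.Set.len, pv_len_ofList_eq_card]
  have hfs : (PySem.List.sorted f (fun w => w) false).toFinset = f.toFinset := by
    ext a; simp [PySem.List.mem_sorted]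
  rw [hfs]
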